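-- pv_equiv track=rewrite | github.com/elocemearg/atropine | generators/fixgen_manual.py | get_table_index_from_slot
-- ===== SOURCE A (Python) =====
-- def get_table_index_from_slot(table_sizes, slot_index):
--     table_index = 0
--     for size in table_sizes:
--         if slot_index < size:
--             return table_index
--         table_index += 1
--         slot_index -= size
--     return None
-- ===== SOURCE B (Python) =====
-- def get_table_index_from_slot(table_sizes, slot_index):
--     prefix = []
--     total = 0
--     for size in table_sizes:
--         total += size
--         prefix.append(total)
--     for i, cum in enumerate(prefix):
--         if slot_index < cum:
--             return i
--     return None
-- ===== Notes on version B (the rewrite author's own statement) =====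
-- stated objective: alternative
-- what changed: Builds the cumulative prefix-sum table of table_sizes once, then finds the first prefix sum exceeding slot_index, instead of subtracting each size from slot_index while counting inside one loop.
import Mathlib
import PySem

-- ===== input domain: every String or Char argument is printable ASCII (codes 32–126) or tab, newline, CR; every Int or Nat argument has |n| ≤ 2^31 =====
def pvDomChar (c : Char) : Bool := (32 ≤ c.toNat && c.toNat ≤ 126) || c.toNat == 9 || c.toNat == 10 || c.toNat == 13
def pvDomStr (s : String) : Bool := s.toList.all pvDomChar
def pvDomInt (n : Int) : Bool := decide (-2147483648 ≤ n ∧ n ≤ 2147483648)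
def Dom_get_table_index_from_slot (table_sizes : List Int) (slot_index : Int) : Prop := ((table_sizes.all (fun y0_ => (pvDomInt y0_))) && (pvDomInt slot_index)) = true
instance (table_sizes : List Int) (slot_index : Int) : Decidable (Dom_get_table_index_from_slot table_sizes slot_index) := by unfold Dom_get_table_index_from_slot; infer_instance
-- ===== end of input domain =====

-- B builds the prefix-sum table once and scans it for the first cumulative value exceeding slot_index (alternative data structure, same cost).
-- ===== PORT A =====
-- loop over table_sizes with state (table_index, slot_index), early return on slot_index < size
def pvLoopA : List Int → Int → Int → Option Int
  | [], _, _ => none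
  | size :: rest, table_index, slot_index =>
      if slot_index < size then some table_index
      else pvLoopA rest (table_index + 1) (slot_index - size)

def get_table_index_from_slot (table_sizes : List Int) (slot_index : Int) : Option Int :=
  pvLoopA table_sizes 0 slot_index

-- ===== PORT B =====
-- first pass of Source B: the foldl carries (prefix, total) exactly as the loop appends to prefix
def pvPrefixB (table_sizes : List Int) : List Int :=
  (table_sizes.foldl (fun st size => (st.1 ++ [st.2 + size], st.2 + size)) ([], 0)).1

-- second pass of Source B: 'for i, cum in enumerate(prefix)' as recursion carrying the index i
def pvFindB : List Int → Int → Int → Option Int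
  | [], _, _ => none
  | cum :: rest, i, slot_index =>
      if slot_index < cum then some i
      else pvFindB rest (i + 1) slot_index

def get_table_index_from_slot_alt (table_sizes : List Int) (slot_index : Int) : Option Int :=
  pvFindB (pvPrefixB table_sizes) 0 slot_index

-- ===== PRECONDITION & SPEC =====
def Spec_get_table_index_from_slot (table_sizes : List Int) (slot_index : Int) (out : Option Int) : Prop := out = get_table_index_from_slot_alt table_sizes slot_index
instance (table_sizes : List Int) (slot_index : Int) (out : Option Int) : Decidable (Spec_get_table_index_from_slot table_sizes slot_index out) := by unfold Spec_get_table_index_from_slot; infer_instance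

-- ===== CLAIM (what is proved, stated in full; the proofs are below) =====
def Claim_equal_get_table_index_from_slot : Prop := ∀ (table_sizes : List Int) (slot_index : Int), Dom_get_table_index_from_slot table_sizes slot_index → Spec_get_table_index_from_slot table_sizes slot_index (get_table_index_from_slot table_sizes slot_index)

-- ===== LEMMAS AND PROOFS =====

-- ===== VERDICT (by name: the statement is the Claim_ definition above) =====
-- proof-side closed form of the prefix pass, starting from running total t
def pvPrefixAux (t : Int) : List Int → List Int
  | [] => []
  | size :: rest => (t + size) :: pvPrefixAux (t + size) rest

theorem pvPrefixB_foldl (ts : List Int) (acc : List Int) (t : Int) :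
    (ts.foldl (fun st size => (st.1 ++ [st.2 + size], st.2 + size)) (acc, t)).1
      = acc ++ pvPrefixAux t ts := by
  induction ts generalizing acc t with
  | nil => simp [pvPrefixAux]
  | cons s ts ih => simp [List.foldl, pvPrefixAux, ih]

theorem pvFindB_eq_loopA (ts : List Int) (t i slot : Int) :
    pvFindB (pvPrefixAux t ts) i slot = pvLoopA ts i (slot - t) := by
  induction ts generalizing t i with
  | nil => rfl
  | cons s ts ih =>
      simp only [pvPrefixAux, pvFindB, pvLoopA]
      by_cases h : slot < t + s
      · rw [if_pos h, if_pos (by omega)]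
      · rw [if_neg h, if_neg (by omega), ih]
        congr 1
        ring

theorem get_table_index_from_slot_spec : Claim_equal_get_table_index_from_slot := by
  intro ts slot _
  show get_table_index_from_slot ts slot = get_table_index_from_slot_alt ts slot
  rw [get_table_index_from_slot, get_table_index_from_slot_alt, pvPrefixB,
    pvPrefixB_foldl, List.nil_append, pvFindB_eq_loopA]
  norm_num
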